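-- pv_equiv track=rewrite | github.com/TheErtzel/AutoAE | utils/logic.py | logs_have_message
-- ===== SOURCE A (Python) =====
-- from typing import Any, Union, List, Tuple, Dict
--
-- def logs_have_message(chatLogs: List[str] = [], text: str = 'fizzled.', textOpposite: str = '') -> bool:
--     textFound = False
--     for log in chatLogs:
--         checkline = str(log)
--         if f'{text}' in checkline:
--             textFound = True
--         if textOpposite != '' and f'{textOpposite}' in checkline:
--             textFound = False
--     return textFound
-- ===== SOURCE B (Python) =====
-- def logs_have_message(chatLogs=[], text='fizzled.', textOpposite=''):
--     # Reverse early-exit: the last log matching either substring decides the answer.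
--     for log in reversed(chatLogs):
--         checkline = str(log)
--         has_text = f'{text}' in checkline
--         has_opp = textOpposite != '' and f'{textOpposite}' in checkline
--         if has_text or has_opp:
--             return has_text and not has_opp
--     return False
-- ===== Notes on version B (the rewrite author's own statement) =====
-- stated objective: alternative
-- what changed: Replaces the full forward flag-toggling pass with a reverse early-exit search: the last log containing either substring decides the result, so the loop stops at the first deciding log from the end.
import Mathlib
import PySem

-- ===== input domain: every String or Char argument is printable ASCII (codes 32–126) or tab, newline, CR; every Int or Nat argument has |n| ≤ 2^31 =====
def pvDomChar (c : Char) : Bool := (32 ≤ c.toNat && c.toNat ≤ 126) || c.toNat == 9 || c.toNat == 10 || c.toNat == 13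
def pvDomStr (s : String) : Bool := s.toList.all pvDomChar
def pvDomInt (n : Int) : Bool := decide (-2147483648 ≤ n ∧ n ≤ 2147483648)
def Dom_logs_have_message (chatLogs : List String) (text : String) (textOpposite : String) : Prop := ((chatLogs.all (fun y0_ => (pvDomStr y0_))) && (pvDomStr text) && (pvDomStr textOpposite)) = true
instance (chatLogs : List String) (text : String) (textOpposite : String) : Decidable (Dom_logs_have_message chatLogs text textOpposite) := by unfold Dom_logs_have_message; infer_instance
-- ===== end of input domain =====

-- B replaces A's forward flag-toggling pass by a reverse early-exit search for the
-- last log containing either substring (objective: alternative, same cost class).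

-- ===== PORT A =====
-- forward loop: set textFound on text match, clear it on (nonempty) textOpposite match
def logs_have_message (chatLogs : List String) (text : String) (textOpposite : String) : Bool :=
  chatLogs.foldl
    (fun textFound log =>
      let checkline := log
      let tf := if PySem.Str.isIn text checkline then true else textFound
      if (textOpposite != "") && PySem.Str.isIn textOpposite checkline then false else tf)
    false

-- ===== PORT B =====
-- reverse early-exit: the first log from the end matching either substring decides
def logsHaveMessageGo (text : String) (textOpposite : String) : List String → Bool
  | [] => false
  | log :: rest =>
    let checkline := log
    let has_text := PySem.Str.isIn text checkline
    let has_opp := (textOpposite != "") && PySem.Str.isIn textOpposite checkline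
    if has_text || has_opp then has_text && !has_opp
    else logsHaveMessageGo text textOpposite rest

def logs_have_message_alt (chatLogs : List String) (text : String) (textOpposite : String) : Bool :=
  logsHaveMessageGo text textOpposite chatLogs.reverse

-- ===== PRECONDITION & SPEC =====
def Spec_logs_have_message (chatLogs : List String) (text : String) (textOpposite : String) (out : Bool) : Prop := out = logs_have_message_alt chatLogs text textOpposite
instance (chatLogs : List String) (text : String) (textOpposite : String) (out : Bool) : Decidable (Spec_logs_have_message chatLogs text textOpposite out) := by unfold Spec_logs_have_message; infer_instance

-- ===== CLAIM (what is proved, stated in full; the proofs are below) =====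
def Claim_equal_logs_have_message : Prop := ∀ (chatLogs : List String) (text : String) (textOpposite : String), Dom_logs_have_message chatLogs text textOpposite → Spec_logs_have_message chatLogs text textOpposite (logs_have_message chatLogs text textOpposite)

-- ===== LEMMAS AND PROOFS =====

-- a log "matches" when either substring occurs (with the nonempty guard on textOpposite)
def pvMatch (text textOpposite log : String) : Bool :=
  PySem.Str.isIn text log || ((textOpposite != "") && PySem.Str.isIn textOpposite log)

lemma go_of_no_match (text textOpposite : String) :
    ∀ ys : List String, ys.any (pvMatch text textOpposite) = false →
      logsHaveMessageGo text textOpposite ys = false := by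
  intro ys h
  induction ys with
  | nil => rfl
  | cons y t ih =>
    simp only [List.any_cons, Bool.or_eq_false_iff] at h
    simp only [logsHaveMessageGo]
    have hm := h.1
    unfold pvMatch at hm
    cases ht : PySem.Chars.isIn text.toList y.toList <;>
      cases ho : PySem.Chars.isIn textOpposite.toList y.toList <;>
      by_cases he : textOpposite = "" <;>
      simp_all [PySem.Str.isIn, ih h.2]

lemma fold_eq (text textOpposite : String) :
    ∀ (xs : List String) (b : Bool),
      xs.foldl
        (fun textFound log =>
          let checkline := log
          let tf := if PySem.Str.isIn text checkline then true else textFound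
          if (textOpposite != "") && PySem.Str.isIn textOpposite checkline then false else tf)
        b
      = (if xs.any (pvMatch text textOpposite) then
           logsHaveMessageGo text textOpposite xs.reverse
         else b) := by
  intro xs
  induction xs using List.reverseRecOn with
  | nil => intro b; simp
  | append_singleton t x ih =>
    intro b
    rw [List.foldl_append]
    simp only [List.foldl_cons, List.foldl_nil, List.any_append, List.any_cons, List.any_nil,
      List.reverse_append, List.reverse_singleton, List.singleton_append, logsHaveMessageGo]
    rw [ih b]
    cases ht : PySem.Chars.isIn text.toList x.toList <;>
      cases ho : PySem.Chars.isIn textOpposite.toList x.toList <;>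
      by_cases he : textOpposite = "" <;>
      simp_all [pvMatch, PySem.Str.isIn]

-- ===== VERDICT (by name: the statement is the Claim_ definition above) =====
theorem logs_have_message_spec : Claim_equal_logs_have_message := by
  intro chatLogs text textOpposite _
  unfold Spec_logs_have_message logs_have_message logs_have_message_alt
  rw [fold_eq]
  by_cases h : chatLogs.any (pvMatch text textOpposite) = true
  · simp [h]
  · simp only [Bool.not_eq_true] at h
    rw [go_of_no_match text textOpposite chatLogs.reverse (by simpa using h)]
    simp [h]
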